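-- pv_equiv track=rewrite | github.com/seancheick/PharmaGuide_Pipeline | scripts/build_final_db.py | _prettify_matched_form
-- ===== SOURCE A (Python) =====
-- from typing import Any, Dict, List, Optional, Tuple
--
-- def safe_str(value: Any, default: str = "") -> str:
--     if value is None:
--         return default
--     return str(value).strip()
--
-- _FORM_PARENT_PREFIXES = (
--     "vitamin a ", "vitamin d ", "vitamin e ", "vitamin k ",
--     "vitamin b1 ", "vitamin b2 ", "vitamin b3 ", "vitamin b5 ",
--     "vitamin b6 ", "vitamin b7 ", "vitamin b9 ", "vitamin b12 ",
--     "vitamin c ",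
-- )
--
-- def _prettify_matched_form(matched_form: str) -> str:
--     """Convert IQM canonical form ('retinyl palmitate') to display label
--     ('Retinyl Palmitate'). Strips parent-nutrient prefix when the form
--     string redundantly carries it (e.g. 'vitamin a palmitate' -> 'Palmitate').
--     Preserves alphanumeric tokens like D3/K2/MK-7/B12 in upper case.
--     """
--     s = safe_str(matched_form).strip()
--     if not s:
--         return ""
--     low = s.lower()
--     for prefix in _FORM_PARENT_PREFIXES:
--         if low.startswith(prefix):
--             s = s[len(prefix):]
--             break
--     return " ".join(_prettify_token(tok) for tok in s.split())
--
-- def _prettify_token(tok: str) -> str: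
--     """Title-case one whitespace-separated token. Hyphen segments
--     handled independently so 'menaquinone-7' becomes 'Menaquinone-7'
--     while short identifiers (D3, K2, MK-7, B12) stay upper.
--     """
--     if "-" in tok:
--         return "-".join(_prettify_token(p) for p in tok.split("-"))
--     if not tok:
--         return tok
--     if tok.isdigit():
--         return tok
--     alpha = "".join(c for c in tok if c.isalpha())
--     has_digit = any(c.isdigit() for c in tok)
--     # Short identifier (≤3 alpha chars): D3, K2, MK, B12 -> upper.
--     if len(alpha) <= 3 and (has_digit or len(alpha) <= 2):
--         return tok.upper()
--     return tok.capitalize()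
-- ===== SOURCE B (Python) =====
-- _VITAMIN_CODES = frozenset(
--     ("a", "b1", "b2", "b3", "b5", "b6", "b7", "b9", "b12", "c", "d", "e", "k"))
--
--
-- def _prettify_matched_form(matched_form: str) -> str:
--     """Display label for an IQM canonical form.  Parses the optional
--     'vitamin <code> ' prefix out of the string (instead of scanning 13
--     candidate prefixes) and then builds the label in ONE left-to-right
--     streaming pass, flushing each hyphen-/whitespace-delimited segment
--     through _case_segment, instead of split/map/join recursion."""
--     s = str(matched_form).strip()
--     low = s.lower()
--     if low.startswith("vitamin "):
--         code, sep, _ = low[8:].partition(" ")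
--         if sep and code in _VITAMIN_CODES:
--             s = s[9 + len(code):]
--     out = []
--     seg = []
--     in_tok = False
--     for c in s + " ":
--         if c.isspace():
--             if in_tok:
--                 out.append(_case_segment("".join(seg)))
--                 seg = []
--                 in_tok = False
--         else:
--             if not in_tok:
--                 if out:
--                     out.append(" ")
--                 in_tok = True
--             if c == "-":
--                 out.append(_case_segment("".join(seg)) + "-")
--                 seg = []
--             else:
--                 seg.append(c)
--     return "".join(out)
--
--
-- def _case_segment(seg: str) -> str:
--     """Case one hyphen-free segment: digits stay, short identifiers go
--     upper, anything else is capitalized."""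
--     if seg == "" or seg.isdigit():
--         return seg
--     alpha = sum(map(str.isalpha, seg))
--     if alpha <= 3 and (alpha <= 2 or any(map(str.isdigit, seg))):
--         return seg.upper()
--     return seg.capitalize()
-- ===== Notes on version B (the rewrite author's own statement) =====
-- stated objective: alternative
-- what changed: B recognises the optional parent-nutrient prefix by parsing it (a startswith check plus a partition of the code token looked up in a frozenset) instead of A's linear scan over 13 candidate prefixes, and builds the display label in one left-to-right streaming character pass with an (out, seg, in_tok) accumulator that flushes hyphen- and whitespace-delimited segments as it meets them, instead of A's split/recursive-hyphen-split/join pipeline.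
import Mathlib
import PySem

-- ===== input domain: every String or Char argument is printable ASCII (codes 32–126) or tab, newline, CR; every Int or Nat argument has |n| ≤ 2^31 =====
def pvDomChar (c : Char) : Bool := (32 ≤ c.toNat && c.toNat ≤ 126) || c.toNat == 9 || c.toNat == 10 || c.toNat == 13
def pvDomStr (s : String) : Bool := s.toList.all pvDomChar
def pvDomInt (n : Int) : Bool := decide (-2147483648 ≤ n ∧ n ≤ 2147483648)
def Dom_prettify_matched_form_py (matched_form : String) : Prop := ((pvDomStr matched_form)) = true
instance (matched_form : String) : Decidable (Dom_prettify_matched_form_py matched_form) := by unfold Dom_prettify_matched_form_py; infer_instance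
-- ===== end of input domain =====

-- B parses the optional parent-nutrient prefix (startswith + partition + set lookup of the code
-- token) instead of scanning A's 13 candidate prefixes, and builds the label in one left-to-right
-- streaming character pass (flushing hyphen- and whitespace-delimited segments as it goes) instead
-- of A's split/map/join recursion (objective: alternative, same cost).

-- ===== PORT A =====

-- Python str.capitalize(): first character upper-cased, rest lower-cased (hand port, exact on the
-- ASCII domain; both Pythons call .capitalize()).
def pvCapitalize (cs : List Char) : List Char :=
  match cs with
  | [] => []
  | c :: rest => PySem.Chars.upperChar c :: PySem.Chars.lower rest

-- safe_str: the argument is a str here, so the None branch is unreachable; str(value).strip().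
def safe_str_py (value : String) (_dflt : String) : String :=
  String.ofList (PySem.Chars.strip value.toList)

def pvPrefixesA : List (List Char) :=
  ["vitamin a ".toList, "vitamin d ".toList, "vitamin e ".toList, "vitamin k ".toList,
   "vitamin b1 ".toList, "vitamin b2 ".toList, "vitamin b3 ".toList, "vitamin b5 ".toList,
   "vitamin b6 ".toList, "vitamin b7 ".toList, "vitamin b9 ".toList, "vitamin b12 ".toList,
   "vitamin c ".toList]

-- _prettify_token; fuel only makes the recursion (depth ≤ 2) structural, the 0 case is unreachable.
def pvTokA : Nat → List Char → List Char
  | 0, tok => tok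
  | fuel+1, tok =>
    if PySem.Chars.isIn ['-'] tok then
      PySem.Chars.join ['-'] ((PySem.Chars.splitOn tok ['-']).map (pvTokA fuel))
    else if tok.isEmpty then tok
    else if PySem.Chars.strIsdigit tok then tok
    else
      let alpha := tok.filter PySem.Chars.isalpha
      let hasDigit := tok.any PySem.Chars.isdigit
      if alpha.length ≤ 3 ∧ (hasDigit = true ∨ alpha.length ≤ 2) then PySem.Chars.upper tok
      else pvCapitalize tok

-- 'for prefix in _FORM_PARENT_PREFIXES: if low.startswith(prefix): s = s[len(prefix):]; break'
def pvStripLoopA (low s : List Char) : List (List Char) → List Char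
  | [] => s
  | p :: ps =>
    if PySem.Chars.startswith low p then PySem.List.slice s (some (p.length : Int)) none
    else pvStripLoopA low s ps

def prettify_matched_form_py (matched_form : String) : String :=
  let s := PySem.Chars.strip (safe_str_py matched_form "").toList
  if s.isEmpty then ""
  else
    let low := PySem.Chars.lower s
    let s2 := pvStripLoopA low s pvPrefixesA
    String.ofList (PySem.Chars.join [' ']
      ((PySem.Chars.split₀ s2).map (fun tok => pvTokA (tok.length + 1) tok)))

-- ===== PORT B =====

def pvCodes : PySem.Set (List Char) :=
  PySem.Set.ofList
    ["a".toList, "b1".toList, "b2".toList, "b3".toList, "b5".toList, "b6".toList,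
     "b7".toList, "b9".toList, "b12".toList, "c".toList, "d".toList, "e".toList, "k".toList]

-- hand port of str.partition(" ") restricted to what B uses: the head before the first ' ' and
-- whether the separator was found (exact: partition returns the whole string and '' when absent).
def pvPartitionSpace (cs : List Char) : List Char × Bool :=
  if PySem.Chars.isIn [' '] cs then (cs.takeWhile (fun d => d != ' '), true) else (cs, false)

-- _case_segment
def pvCaseSegment (seg : List Char) : List Char :=
  if seg.isEmpty || PySem.Chars.strIsdigit seg then seg
  else
    let alpha := (seg.map (fun c => if PySem.Chars.isalpha c then (1 : Int) else 0)).sum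
    if alpha ≤ 3 ∧ (alpha ≤ 2 ∨ seg.any PySem.Chars.isdigit = true) then PySem.Chars.upper seg
    else pvCapitalize seg

-- one step of the streaming loop body: state (out, seg, in_tok)
def pvStepB (st : List (List Char) × List Char × Bool) (c : Char) :
    List (List Char) × List Char × Bool :=
  match st with
  | (out, seg, inTok) =>
    if PySem.Chars.isspace c then
      if inTok then (out ++ [pvCaseSegment seg], [], false) else (out, seg, inTok)
    else
      let out' := if inTok = false ∧ out ≠ [] then out ++ [[' ']] else out
      if c = '-' then (out' ++ [pvCaseSegment seg ++ ['-']], [], true)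
      else (out', seg ++ [c], true)

def prettify_matched_form_py_alt (matched_form : String) : String :=
  let s0 := PySem.Chars.strip matched_form.toList
  let low := PySem.Chars.lower s0
  let s :=
    if PySem.Chars.startswith low "vitamin ".toList then
      let rest := PySem.List.slice low (some 8) none
      let pr := pvPartitionSpace rest
      if pr.2 = true ∧ PySem.Set.contains pvCodes pr.1 = true then
        PySem.List.slice s0 (some (9 + (pr.1.length : Int))) none
      else s0
    else s0
  let fin := (s ++ [' ']).foldl pvStepB ([], [], false)
  String.ofList fin.1.flatten

-- ===== PRECONDITION & SPEC =====
def Spec_prettify_matched_form_py (matched_form : String) (out : String) : Prop := out = prettify_matched_form_py_alt matched_form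
instance (matched_form : String) (out : String) : Decidable (Spec_prettify_matched_form_py matched_form out) := by unfold Spec_prettify_matched_form_py; infer_instance

-- ===== CLAIM (what is proved, stated in full; the proofs are below) =====
def Claim_equal_prettify_matched_form_py : Prop := ∀ (matched_form : String), Dom_prettify_matched_form_py matched_form → Spec_prettify_matched_form_py matched_form (prettify_matched_form_py matched_form)

-- ===== LEMMAS AND PROOFS =====

-- strip is idempotent
lemma pv_head?_dropWhile {p : Char → Bool} {t : List Char} {x : Char}
    (h : (t.dropWhile p).head? = some x) : p x = false := by
  induction t with
  | nil => simp at h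
  | cons c rest ih =>
    by_cases hc : p c
    · simpa [List.dropWhile_cons, hc] using ih (by simpa [List.dropWhile_cons, hc] using h)
    · rw [List.dropWhile_cons_of_neg (by simpa using hc)] at h
      simp at h
      subst h
      simpa using hc

lemma pv_rstrip_prefix (t : List Char) : PySem.Chars.rstrip t <+: t := by
  unfold PySem.Chars.rstrip
  conv_rhs => rw [← t.reverse_reverse]
  exact List.reverse_prefix.mpr (List.dropWhile_suffix _)

lemma pv_lstrip_rstrip (t : List Char) (ht : ∀ x, t.head? = some x → PySem.Chars.isspace x = false) :
    PySem.Chars.lstrip (PySem.Chars.rstrip t) = PySem.Chars.rstrip t := by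
  rw [PySem.Chars.lstrip, List.dropWhile_eq_self_iff]
  intro hl
  obtain ⟨w, hw⟩ := pv_rstrip_prefix t
  have hne : PySem.Chars.rstrip t ≠ [] := by
    intro hnil
    rw [hnil] at hl
    simp at hl
  have hhead : t.head? = some (PySem.Chars.rstrip t)[0] := by
    conv_lhs => rw [← hw]
    rw [List.head?_append_of_ne_nil _ hne]
    rw [List.head?_eq_getElem?]
    simp [List.getElem?_eq_getElem hl]
  simpa using ht _ hhead

lemma pv_rstrip_rstrip (t : List Char) :
    PySem.Chars.rstrip (PySem.Chars.rstrip t) = PySem.Chars.rstrip t := by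
  simp [PySem.Chars.rstrip, List.reverse_reverse, List.dropWhile_idempotent]

lemma pv_strip_strip (s : List Char) :
    PySem.Chars.strip (PySem.Chars.strip s) = PySem.Chars.strip s := by
  show PySem.Chars.rstrip (PySem.Chars.lstrip (PySem.Chars.rstrip (PySem.Chars.lstrip s))) =
    PySem.Chars.rstrip (PySem.Chars.lstrip s)
  rw [pv_lstrip_rstrip (PySem.Chars.lstrip s) (fun x hx => pv_head?_dropWhile hx),
    pv_rstrip_rstrip]

-- ===== prefix side =====

def pvCodesL : List (List Char) :=
  ["a".toList, "d".toList, "e".toList, "k".toList, "b1".toList, "b2".toList, "b3".toList,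
   "b5".toList, "b6".toList, "b7".toList, "b9".toList, "b12".toList, "c".toList]

-- membership in B's code set = membership in the codes listed in A's order
lemma pv_codes_mem (x : List Char) : PySem.Set.contains pvCodes x = true ↔ x ∈ pvCodesL := by
  rw [show (PySem.Set.contains pvCodes x = true) ↔ x ∈ ("a".toList :: "b1".toList ::
      "b2".toList :: "b3".toList :: "b5".toList :: "b6".toList :: "b7".toList :: "b9".toList ::
      "b12".toList :: "c".toList :: "d".toList :: "e".toList :: ["k".toList]) from
    List.contains_iff_mem]
  simp [pvCodesL]
  tauto

lemma pv_prefixes_eq :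
    pvPrefixesA = pvCodesL.map (fun c => "vitamin ".toList ++ c ++ [' ']) := by decide

lemma pv_code_no_space {c : List Char} (hc : c ∈ pvCodesL) : ' ' ∉ c := by
  fin_cases hc <;> decide

-- A's loop
lemma pv_loopA_none (low s : List Char) (ps : List (List Char))
    (h : ∀ p ∈ ps, ¬ p <+: low) : pvStripLoopA low s ps = s := by
  induction ps with
  | nil => rfl
  | cons p ps ih =>
    have : PySem.Chars.startswith low p = false := by
      rw [PySem.Chars.startswith, Bool.eq_false_iff]
      exact fun hc => h p (by simp) (List.isPrefixOf_iff_prefix.mp hc)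
    simp [pvStripLoopA, this]
    exact ih (fun q hq => h q (by simp [hq]))

lemma pv_loopA_found (low s : List Char) (ps : List (List Char)) (p : List Char)
    (hmem : p ∈ ps) (hpre : p <+: low) (huniq : ∀ q ∈ ps, q <+: low → q = p) :
    pvStripLoopA low s ps = PySem.List.slice s (some (p.length : Int)) none := by
  induction ps with
  | nil => simp at hmem
  | cons q ps ih =>
    by_cases hq : q <+: low
    · have : q = p := huniq q (by simp) hq
      subst this
      simp [pvStripLoopA, PySem.Chars.startswith, List.isPrefixOf_iff_prefix.mpr hq]
    · have : PySem.Chars.startswith low q = false := by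
        rw [PySem.Chars.startswith, Bool.eq_false_iff]
        intro hc
        exact hq (List.isPrefixOf_iff_prefix.mp hc)
      simp [pvStripLoopA, this]
      have hmem' : p ∈ ps := by
        rcases List.mem_cons.mp hmem with h | h
        · exact absurd (h ▸ hpre) hq
        · exact h
      exact (by simpa using ih hmem' (fun r hr => huniq r (by simp [hr])))

-- 'code ++ " " is a prefix of rest' read off str.partition(" ")
lemma pv_code_pre (c t : List Char) (hc : ' ' ∉ c) :
    (c ++ [' ']) <+: t ↔ (' ' ∈ t ∧ t.takeWhile (fun d => d != ' ') = c) := by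
  constructor
  · rintro ⟨t', rfl⟩
    constructor
    · simp
    · rw [List.append_assoc, List.takeWhile_append_of_pos ?_]
      · simp
      · intro d hd
        simp only [bne_iff_ne, ne_eq]
        rintro rfl
        exact hc hd
  · rintro ⟨hmem, htw⟩
    have hsplit := List.takeWhile_append_dropWhile (p := fun d => d != ' ') (l := t)
    rw [htw] at hsplit
    have hne : t.dropWhile (fun d => d != ' ') ≠ [] := by
      intro h0
      rw [h0, List.append_nil] at hsplit
      exact hc (hsplit ▸ hmem)
    obtain ⟨x, rest, hx⟩ := List.exists_cons_of_ne_nil hne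
    have hxsp : x = ' ' := by
      have := pv_head?_dropWhile (t := t) (p := fun d => d != ' ') (by rw [hx]; rfl)
      simpa using this
    refine ⟨rest, ?_⟩
    rw [← hsplit, hx, hxsp]
    simp

-- the two prefix computations agree (stated over arbitrary low, s0)
lemma pv_prefix_eq (low s0 : List Char) :
    (if PySem.Chars.startswith low "vitamin ".toList then
       let rest := PySem.List.slice low (some 8) none
       let pr := pvPartitionSpace rest
       if pr.2 = true ∧ PySem.Set.contains pvCodes pr.1 = true then
         PySem.List.slice s0 (some (9 + (pr.1.length : Int))) none
       else s0
     else s0) = pvStripLoopA low s0 pvPrefixesA := by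
  by_cases hsw : PySem.Chars.startswith low "vitamin ".toList = true
  · rw [if_pos hsw]
    obtain ⟨t, rfl⟩ : "vitamin ".toList <+: low := (PySem.Chars.startswith_iff _ _).mp hsw
    have hrest : PySem.List.slice ("vitamin ".toList ++ t) (some 8) none = t := by
      rw [show ((8 : Int)) = (((8 : Nat) : Int)) by norm_num, PySem.List.slice_from_natCast]
      simp
    simp only [hrest]
    by_cases hin : PySem.Chars.isIn [' '] t = true
    · have hmem : ' ' ∈ t := (List.singleton_infix_iff ' ' t).mp ((PySem.Chars.isIn_iff_infix _ _).mp hin)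
      rw [show pvPartitionSpace t = (t.takeWhile (fun d => d != ' '), true) from by
        simp [pvPartitionSpace, hin]]
      set code := t.takeWhile (fun d => d != ' ') with hcode
      by_cases hcm : PySem.Set.contains pvCodes code = true
      · rw [if_pos ⟨rfl, hcm⟩]
        have hcmem : code ∈ pvCodesL := (pv_codes_mem code).mp hcm
        have hnosp : ' ' ∉ code := pv_code_no_space hcmem
        have hp : ("vitamin ".toList ++ code ++ [' ']) ∈ pvPrefixesA := by
          rw [pv_prefixes_eq]
          exact List.mem_map.mpr ⟨code, hcmem, rfl⟩
        have hppre : ("vitamin ".toList ++ code ++ [' ']) <+: ("vitamin ".toList ++ t) := by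
          rw [List.append_assoc]
          exact (List.prefix_append_right_inj _).mpr ((pv_code_pre code t hnosp).mpr ⟨hmem, rfl⟩)
        have huniq : ∀ q ∈ pvPrefixesA, q <+: ("vitamin ".toList ++ t) →
            q = "vitamin ".toList ++ code ++ [' '] := by
          intro q hq hqpre
          rw [pv_prefixes_eq] at hq
          obtain ⟨cq, hcq, rfl⟩ := List.mem_map.mp hq
          have : (cq ++ [' ']) <+: t := by
            rw [List.append_assoc] at hqpre
            exact (List.prefix_append_right_inj _).mp hqpre
          have h2 := ((pv_code_pre cq t (pv_code_no_space hcq)).mp this).2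
          rw [← hcode] at h2
          rw [h2]
        rw [pv_loopA_found _ _ _ _ hp hppre huniq]
        have hlen : (("vitamin ".toList ++ code ++ [' ']).length : Int) =
            9 + (code.length : Int) := by
          simp [List.length_append]
          push_cast
          ring
        rw [← hlen]
      · rw [if_neg (fun h => hcm h.2)]
        rw [pv_loopA_none]
        intro p hp hppre
        rw [pv_prefixes_eq] at hp
        obtain ⟨cp, hcp, rfl⟩ := List.mem_map.mp hp
        have hpre2 : (cp ++ [' ']) <+: t := by
          rw [List.append_assoc] at hppre
          exact (List.prefix_append_right_inj _).mp hppre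
        have h2 := ((pv_code_pre cp t (pv_code_no_space hcp)).mp hpre2).2
        exact hcm ((pv_codes_mem code).mpr (by rw [hcode, h2]; exact hcp))
    · rw [show pvPartitionSpace t = (t, false) from by simp [pvPartitionSpace, hin]]
      rw [if_neg (by rintro ⟨h, -⟩; simp at h)]
      rw [pv_loopA_none]
      intro p hp hppre
      rw [pv_prefixes_eq] at hp
      obtain ⟨cp, hcp, rfl⟩ := List.mem_map.mp hp
      have hpre2 : (cp ++ [' ']) <+: t := by
        rw [List.append_assoc] at hppre
        exact (List.prefix_append_right_inj _).mp hppre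
      obtain ⟨t', rfl⟩ := hpre2
      exact absurd ((PySem.Chars.isIn_iff_infix [' '] (cp ++ [' '] ++ t')).mpr
        ((List.singleton_infix_iff ' ' (cp ++ [' '] ++ t')).mpr (by simp))) hin
  · rw [if_neg hsw, pv_loopA_none]
    intro p hp hppre
    apply hsw
    rw [pv_prefixes_eq] at hp
    obtain ⟨cp, _, rfl⟩ := List.mem_map.mp hp
    refine (PySem.Chars.startswith_iff _ _).mpr (List.IsPrefix.trans ?_ hppre)
    rw [List.append_assoc]
    exact List.prefix_append _ _

-- ===== token side =====

-- structural version of PySem.Chars.splitOn on separator "-"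
def pvHySplit : List Char → List Char → List (List Char)
  | cur, [] => [cur.reverse]
  | cur, c :: rest => if c = '-' then cur.reverse :: pvHySplit [] rest else pvHySplit (c :: cur) rest

lemma pv_go_eq (fuel : Nat) (l cur : List Char) (acc : List (List Char))
    (h : l.length < fuel) :
    PySem.Chars.splitOn.go ['-'] fuel l cur acc = acc.reverse ++ pvHySplit cur l := by
  induction fuel generalizing l cur acc with
  | zero => omega
  | succ fuel ih =>
    cases l with
    | nil => simp [PySem.Chars.splitOn.go, pvHySplit]
    | cons c rest =>
      by_cases hc : c = '-'
      · subst hc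
        rw [PySem.Chars.splitOn.go]
        simp only [List.isPrefixOf, BEq.rfl, Bool.and_eq_true]
        rw [if_pos (by simp)]
        rw [show List.drop ['-'].length ('-' :: rest) = rest from rfl]
        rw [ih rest [] (cur.reverse :: acc) (by simpa using Nat.lt_of_succ_lt_succ h)]
        simp [pvHySplit]
      · rw [PySem.Chars.splitOn.go]
        rw [if_neg (by simp [List.isPrefixOf]; exact fun hy => hc hy.symm)]
        rw [ih rest (c :: cur) acc (by simpa using Nat.lt_of_succ_lt_succ h)]
        rw [show pvHySplit cur (c :: rest) = pvHySplit (c :: cur) rest by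
          simp [pvHySplit, hc]]

lemma pv_splitOn_eq (l : List Char) :
    PySem.Chars.splitOn l ['-'] = pvHySplit [] l := by
  unfold PySem.Chars.splitOn
  simpa using pv_go_eq (l.length + 1) l [] [] (by omega)

lemma pv_hySplit_noHyphen (l cur : List Char) (h : '-' ∉ l) :
    pvHySplit cur l = [cur.reverse ++ l] := by
  induction l generalizing cur with
  | nil => simp [pvHySplit]
  | cons c rest ih =>
    have hc : c ≠ '-' := by rintro rfl; exact h (by simp)
    simp [pvHySplit, hc, ih _ (fun hm => h (by simp [hm]))]

lemma pv_hySplit_parts (l cur : List Char) (hcur : '-' ∉ cur) :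
    ∀ part ∈ pvHySplit cur l, '-' ∉ part := by
  induction l generalizing cur with
  | nil => simpa [pvHySplit] using (by simpa using hcur)
  | cons c rest ih =>
    by_cases hc : c = '-'
    · subst hc
      intro part hp
      simp [pvHySplit] at hp
      rcases hp with rfl | hp
      · simpa using hcur
      · exact ih [] (by simp) part hp
    · intro part hp
      simp [pvHySplit, hc] at hp
      exact ih (c :: cur) (by simp [hcur, Ne.symm hc]) part hp

lemma pv_hySplit_len (l cur : List Char) :
    ∀ part ∈ pvHySplit cur l,
      part.length ≤ cur.length + l.length ∧
        ('-' ∈ l → part.length < cur.length + l.length) := by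
  induction l generalizing cur with
  | nil => simp [pvHySplit]
  | cons c rest ih =>
    intro part hp
    by_cases hc : c = '-'
    · subst hc
      simp [pvHySplit] at hp
      rcases hp with rfl | hp
      · constructor <;> simp
      · have := ih [] part hp
        simp at this
        constructor
        · simp; omega
        · intro _; simp; omega
    · simp [pvHySplit, hc] at hp
      have := ih (c :: cur) part hp
      simp at this
      constructor
      · simp; omega
      · intro hm
        rcases List.mem_cons.mp hm with h | h
        · exact absurd h.symm hc
        · have := this.2 h; simp; omega

lemma pv_hySplit_ne_nil (cur l : List Char) : pvHySplit cur l ≠ [] := by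
  induction l generalizing cur with
  | nil => simp [pvHySplit]
  | cons c rest ih =>
    by_cases hc : c = '-' <;> simp [pvHySplit, hc, ih]

lemma pv_isIn_hyphen (tok : List Char) :
    PySem.Chars.isIn ['-'] tok = true ↔ '-' ∈ tok := by
  rw [PySem.Chars.isIn_iff_infix]
  exact List.singleton_infix_iff '-' tok

-- the sequential base cases of _prettify_token equal _case_segment
lemma pv_base_eq (tok : List Char) :
    (if tok.isEmpty then tok
     else if PySem.Chars.strIsdigit tok then tok
     else
       let alpha := tok.filter PySem.Chars.isalpha
       let hasDigit := tok.any PySem.Chars.isdigit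
       if alpha.length ≤ 3 ∧ (hasDigit = true ∨ alpha.length ≤ 2) then PySem.Chars.upper tok
       else pvCapitalize tok) = pvCaseSegment tok := by
  unfold pvCaseSegment
  by_cases h1 : tok.isEmpty
  · simp [h1]
  · by_cases h2 : PySem.Chars.strIsdigit tok
    · simp [h1, h2]
    · rw [if_neg (by simp [h1]), if_neg (by simp [h2]),
        if_neg (show ¬((tok.isEmpty || PySem.Chars.strIsdigit tok) = true) from by simp [h1, h2])]
      show (if (tok.filter PySem.Chars.isalpha).length ≤ 3 ∧
              (tok.any PySem.Chars.isdigit = true ∨ (tok.filter PySem.Chars.isalpha).length ≤ 2)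
            then PySem.Chars.upper tok else pvCapitalize tok) =
          (if (tok.map (fun c => if PySem.Chars.isalpha c then (1 : Int) else 0)).sum ≤ 3 ∧
              ((tok.map (fun c => if PySem.Chars.isalpha c then (1 : Int) else 0)).sum ≤ 2 ∨
                tok.any PySem.Chars.isdigit = true)
            then PySem.Chars.upper tok else pvCapitalize tok)
      rw [PySem.List.sum_map_ite_one_zero, List.countP_eq_length_filter]
      refine if_congr ?_ rfl rfl
      constructor
      · rintro ⟨h3, h4⟩
        refine ⟨by exact_mod_cast h3, ?_⟩
        rcases h4 with h | h
        · exact Or.inr h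
        · exact Or.inl (by exact_mod_cast h)
      · rintro ⟨h3, h4⟩
        refine ⟨by exact_mod_cast h3, ?_⟩
        rcases h4 with h | h
        · exact Or.inr (by exact_mod_cast h)
        · exact Or.inl h

-- _prettify_token computes '-'.join(map(_case_segment, tok.split('-')))
lemma pv_tokA_eq (fuel : Nat) (tok : List Char) (h : tok.length < fuel) :
    pvTokA fuel tok =
      PySem.Chars.join ['-'] ((pvHySplit [] tok).map pvCaseSegment) := by
  induction fuel generalizing tok with
  | zero => omega
  | succ fuel ih =>
    by_cases hin : PySem.Chars.isIn ['-'] tok = true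
    · have hmem : '-' ∈ tok := (pv_isIn_hyphen tok).mp hin
      rw [pvTokA, if_pos hin, pv_splitOn_eq]
      congr 1
      apply List.map_congr_left
      intro part hpart
      have hlen := (pv_hySplit_len tok [] part hpart).2 (by simpa using hmem)
      simp at hlen
      have hnp : '-' ∉ part := pv_hySplit_parts tok [] (by simp) part hpart
      rw [ih part (by omega), show pvHySplit [] part = [part] from by
        rw [pv_hySplit_noHyphen part [] hnp]; rfl]
      simp [PySem.Chars.join, List.intercalate]
    · have hnm : '-' ∉ tok := fun hm => hin ((pv_isIn_hyphen tok).mpr hm)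
      rw [pvTokA, if_neg hin]
      rw [pv_hySplit_noHyphen tok [] hnm]
      rw [show List.map pvCaseSegment [List.reverse [] ++ tok] = [pvCaseSegment tok] by simp]
      rw [show PySem.Chars.join ['-'] [pvCaseSegment tok] = pvCaseSegment tok by
        simp [PySem.Chars.join, List.intercalate]]
      exact pv_base_eq tok

-- ===== streaming side =====

-- structural version of PySem.Chars.split₀ (s.split()), cur held reversed
def pvWsSplit : List Char → List Char → List (List Char)
  | cur, [] => if cur.isEmpty then [] else [cur.reverse]
  | cur, c :: rest =>
    if PySem.Chars.isspace c then
      if cur.isEmpty then pvWsSplit [] rest else cur.reverse :: pvWsSplit [] rest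
    else pvWsSplit (c :: cur) rest

lemma pv_split0_go_eq (l cur : List Char) (acc : List (List Char)) :
    PySem.Chars.split₀.go l cur acc = acc.reverse ++ pvWsSplit cur l := by
  induction l generalizing cur acc with
  | nil =>
    by_cases hc : cur.isEmpty <;> simp [PySem.Chars.split₀.go, pvWsSplit, hc]
  | cons c rest ih =>
    by_cases hs : PySem.Chars.isspace c
    · by_cases hc : cur.isEmpty
      · simp [PySem.Chars.split₀.go, pvWsSplit, hs, hc, ih]
      · simp [PySem.Chars.split₀.go, pvWsSplit, hs, hc, ih]
    · simp [PySem.Chars.split₀.go, pvWsSplit, hs, ih]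

lemma pv_split0_eq (l : List Char) : PySem.Chars.split₀ l = pvWsSplit [] l := by
  unfold PySem.Chars.split₀
  simpa using pv_split0_go_eq l [] []

-- inside a token, pvWsSplit reads up to the next whitespace
lemma pv_wsSplit_token (u : List Char) : ∀ cur : List Char, cur ≠ [] →
    pvWsSplit cur u =
      (cur.reverse ++ u.takeWhile (fun c => !PySem.Chars.isspace c)) ::
        pvWsSplit [] (u.dropWhile (fun c => !PySem.Chars.isspace c)) := by
  induction u with
  | nil =>
    intro cur hcur
    simp [pvWsSplit, hcur]
  | cons c rest ih =>
    intro cur hcur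
    by_cases hs : PySem.Chars.isspace c
    · simp [pvWsSplit, hs, hcur]
    · simp only [pvWsSplit, hs, Bool.false_eq_true, if_false, List.takeWhile_cons,
        List.dropWhile_cons, Bool.not_false, if_true]
      rw [ih (c :: cur) (by simp)]
      simp

def pvPrettyTok (t : List Char) : List Char :=
  PySem.Chars.join ['-'] ((pvHySplit [] t).map pvCaseSegment)

def pvSpecTokens (u : List Char) : List Char :=
  (pvWsSplit [] u).flatMap (fun t => ' ' :: pvPrettyTok t)

def pvFlat (st : List (List Char) × List Char × Bool) (u : List Char) : List Char :=
  (((u ++ [' ']).foldl pvStepB st).1).flatten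

lemma pv_join_cons (sep : Char) (a : List Char) (l : List (List Char)) (hl : l ≠ []) :
    PySem.Chars.join [sep] (a :: l) = a ++ sep :: PySem.Chars.join [sep] l := by
  obtain ⟨b, l', rfl⟩ := List.exists_cons_of_ne_nil hl
  simp [PySem.Chars.join, List.intercalate, List.intersperse]

lemma pv_join_sp_flatMap (f : List Char → List Char) (t : List Char) (ts : List (List Char)) :
    PySem.Chars.join [' '] ((t :: ts).map f) = f t ++ ts.flatMap (fun x => ' ' :: f x) := by
  induction ts generalizing t with
  | nil => simp [PySem.Chars.join, List.intercalate]
  | cons b ts ih =>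
    rw [List.map_cons, pv_join_cons ' ' (f t) (List.map f (b :: ts)) (by simp), ih b]
    simp

-- the streaming loop invariant: (1) inside a token with pending segment seg,
-- (2) between tokens with nonempty out, (3) from the initial state
lemma pv_stream (u : List Char) :
    (∀ out seg, pvFlat (out, seg, true) u =
        out.flatten ++
          PySem.Chars.join ['-']
            ((pvHySplit seg.reverse (u.takeWhile (fun c => !PySem.Chars.isspace c))).map
              pvCaseSegment) ++
          pvSpecTokens (u.dropWhile (fun c => !PySem.Chars.isspace c))) ∧
    (∀ out : List (List Char), out ≠ [] →
        pvFlat (out, [], false) u = out.flatten ++ pvSpecTokens u) ∧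
    (pvFlat ([], [], false) u = PySem.Chars.join [' '] ((pvWsSplit [] u).map pvPrettyTok)) := by
  induction u with
  | nil =>
    have hsp : PySem.Chars.isspace ' ' = true := rfl
    refine ⟨?_, ?_, ?_⟩
    · intro out seg
      show ((pvStepB (out, seg, true) ' ').1).flatten = _
      simp [pvStepB, hsp, pvHySplit, pvWsSplit, pvSpecTokens, PySem.Chars.join,
        List.intercalate]
    · intro out hout
      show ((pvStepB (out, [], false) ' ').1).flatten = _
      simp [pvStepB, hsp, pvSpecTokens, pvWsSplit]
    · show ((pvStepB ([], [], false) ' ').1).flatten = _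
      simp [pvStepB, hsp, pvWsSplit, PySem.Chars.join, List.intercalate]
  | cons c u ih =>
    obtain ⟨ih1, ih2, ih3⟩ := ih
    have hstep : ∀ st, pvFlat st (c :: u) = pvFlat (pvStepB st c) u := by
      intro st
      simp [pvFlat, List.cons_append, List.foldl_cons]
    refine ⟨?_, ?_, ?_⟩
    · intro out seg
      rw [hstep]
      by_cases hs : PySem.Chars.isspace c
      · rw [show pvStepB (out, seg, true) c = (out ++ [pvCaseSegment seg], [], false) by
          simp [pvStepB, hs]]
        rw [ih2 _ (by simp)]
        simp only [List.takeWhile_cons, List.dropWhile_cons, hs, Bool.not_true,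
          Bool.false_eq_true, if_false]
        rw [show pvHySplit seg.reverse [] = [seg] by simp [pvHySplit]]
        rw [show PySem.Chars.join ['-'] ([seg].map pvCaseSegment) = pvCaseSegment seg by
          simp [PySem.Chars.join, List.intercalate]]
        simp [pvSpecTokens, pvWsSplit, hs]
      · by_cases hc : c = '-'
        · subst hc
          rw [show pvStepB (out, seg, true) '-' =
              (out ++ [pvCaseSegment seg ++ ['-']], [], true) by simp [pvStepB, hs]]
          rw [ih1]
          simp only [List.takeWhile_cons, List.dropWhile_cons, hs, Bool.not_false, if_true]
          rw [show pvHySplit seg.reverse ('-' :: (u.takeWhile (fun c => !PySem.Chars.isspace c))) =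
              seg :: pvHySplit [] (u.takeWhile (fun c => !PySem.Chars.isspace c)) by
            simp [pvHySplit]]
          rw [List.map_cons, pv_join_cons '-' _ _ (by simp [pv_hySplit_ne_nil])]
          simp
        · rw [show pvStepB (out, seg, true) c = (out, seg ++ [c], true) by
            simp [pvStepB, hs, hc]]
          rw [ih1]
          simp only [List.takeWhile_cons, List.dropWhile_cons, hs, Bool.not_false, if_true]
          rw [show (seg ++ [c]).reverse = c :: seg.reverse by simp]
          rw [show pvHySplit seg.reverse (c :: (u.takeWhile (fun c => !PySem.Chars.isspace c))) =
              pvHySplit (c :: seg.reverse) (u.takeWhile (fun c => !PySem.Chars.isspace c)) by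
            simp [pvHySplit, hc]]
    · intro out hout
      rw [hstep]
      by_cases hs : PySem.Chars.isspace c
      · rw [show pvStepB (out, [], false) c = (out, [], false) by simp [pvStepB, hs]]
        rw [ih2 _ hout]
        simp [pvSpecTokens, pvWsSplit, hs]
      · have hsp : pvWsSplit [] (c :: u) =
            (c :: u.takeWhile (fun c => !PySem.Chars.isspace c)) ::
              pvWsSplit [] (u.dropWhile (fun c => !PySem.Chars.isspace c)) := by
          rw [show pvWsSplit [] (c :: u) = pvWsSplit [c] u by simp [pvWsSplit, hs]]
          rw [pv_wsSplit_token u [c] (by simp)]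
          simp
        by_cases hc : c = '-'
        · subst hc
          rw [show pvStepB (out, [], false) '-' =
              (out ++ [[' ']] ++ [pvCaseSegment [] ++ ['-']], [], true) by
            simp [pvStepB, hs, hout]]
          rw [ih1]
          rw [show pvCaseSegment [] = [] from rfl]
          simp only [pvSpecTokens, hsp, List.flatMap_cons]
          rw [show pvPrettyTok ('-' :: u.takeWhile (fun c => !PySem.Chars.isspace c)) =
              '-' :: PySem.Chars.join ['-']
                ((pvHySplit [] (u.takeWhile (fun c => !PySem.Chars.isspace c))).map
                  pvCaseSegment) by
            unfold pvPrettyTok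
            rw [show pvHySplit [] ('-' :: u.takeWhile (fun c => !PySem.Chars.isspace c)) =
                [] :: pvHySplit [] (u.takeWhile (fun c => !PySem.Chars.isspace c)) by
              simp [pvHySplit]]
            rw [List.map_cons, pv_join_cons '-' _ _ (by simp [pv_hySplit_ne_nil])]
            simp [pvCaseSegment]]
          simp
        · rw [show pvStepB (out, [], false) c = (out ++ [[' ']], [c], true) by
            simp [pvStepB, hs, hc, hout]]
          rw [ih1]
          simp only [pvSpecTokens, hsp, List.flatMap_cons]
          rw [show pvPrettyTok (c :: u.takeWhile (fun c => !PySem.Chars.isspace c)) =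
              PySem.Chars.join ['-']
                ((pvHySplit [List.reverse [c]].flatten (u.takeWhile (fun c => !PySem.Chars.isspace c))).map
                  pvCaseSegment) by
            unfold pvPrettyTok
            rw [show pvHySplit [] (c :: u.takeWhile (fun c => !PySem.Chars.isspace c)) =
                pvHySplit [c] (u.takeWhile (fun c => !PySem.Chars.isspace c)) by
              simp [pvHySplit, hc]]
            simp]
          simp
    · rw [hstep]
      by_cases hs : PySem.Chars.isspace c
      · rw [show pvStepB ([], [], false) c = ([], [], false) by simp [pvStepB, hs]]
        rw [ih3]
        simp [pvWsSplit, hs]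
      · have hsp : pvWsSplit [] (c :: u) =
            (c :: u.takeWhile (fun c => !PySem.Chars.isspace c)) ::
              pvWsSplit [] (u.dropWhile (fun c => !PySem.Chars.isspace c)) := by
          rw [show pvWsSplit [] (c :: u) = pvWsSplit [c] u by simp [pvWsSplit, hs]]
          rw [pv_wsSplit_token u [c] (by simp)]
          simp
        rw [hsp, pv_join_sp_flatMap]
        by_cases hc : c = '-'
        · subst hc
          rw [show pvStepB ([], [], false) '-' = ([pvCaseSegment [] ++ ['-']], [], true) by
            simp [pvStepB, hs]]
          rw [ih1]
          rw [show pvCaseSegment [] = [] from rfl]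
          rw [show pvPrettyTok ('-' :: u.takeWhile (fun c => !PySem.Chars.isspace c)) =
              '-' :: PySem.Chars.join ['-']
                ((pvHySplit [] (u.takeWhile (fun c => !PySem.Chars.isspace c))).map
                  pvCaseSegment) by
            unfold pvPrettyTok
            rw [show pvHySplit [] ('-' :: u.takeWhile (fun c => !PySem.Chars.isspace c)) =
                [] :: pvHySplit [] (u.takeWhile (fun c => !PySem.Chars.isspace c)) by
              simp [pvHySplit]]
            rw [List.map_cons, pv_join_cons '-' _ _ (by simp [pv_hySplit_ne_nil])]
            simp [pvCaseSegment]]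
          simp [pvSpecTokens]
        · rw [show pvStepB ([], [], false) c = ([], [c], true) by simp [pvStepB, hs, hc]]
          rw [ih1]
          rw [show pvPrettyTok (c :: u.takeWhile (fun c => !PySem.Chars.isspace c)) =
              PySem.Chars.join ['-']
                ((pvHySplit [c] (u.takeWhile (fun c => !PySem.Chars.isspace c))).map
                  pvCaseSegment) by
            unfold pvPrettyTok
            rw [show pvHySplit [] (c :: u.takeWhile (fun c => !PySem.Chars.isspace c)) =
                pvHySplit [c] (u.takeWhile (fun c => !PySem.Chars.isspace c)) by
              simp [pvHySplit, hc]]]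
          simp [pvSpecTokens]

-- ===== VERDICT (by name: the statement is the Claim_ definition above) =====
theorem prettify_matched_form_py_spec : Claim_equal_prettify_matched_form_py := by
  intro mf _hd
  unfold Spec_prettify_matched_form_py
  simp only [prettify_matched_form_py, prettify_matched_form_py_alt, safe_str_py,
    String.toList_ofList]
  rw [pv_strip_strip]
  set s0 := PySem.Chars.strip mf.toList with hs0
  rw [pv_prefix_eq (PySem.Chars.lower s0) s0]
  set s2 := pvStripLoopA (PySem.Chars.lower s0) s0 pvPrefixesA with hs2
  have hB : String.ofList (((s2 ++ [' ']).foldl pvStepB ([], [], false)).1).flatten =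
      String.ofList (PySem.Chars.join [' '] ((pvWsSplit [] s2).map pvPrettyTok)) := by
    have := (pv_stream s2).2.2
    rw [pvFlat] at this
    rw [this]
  by_cases hE : s0.isEmpty
  · rw [if_pos hE]
    have : s0 = [] := List.isEmpty_iff.mp hE
    rw [hB]
    rw [show s2 = [] by rw [hs2, this]; rfl]
    rfl
  · rw [if_neg hE, hB, pv_split0_eq]
    congr 1
    congr 1
    apply List.map_congr_left
    intro tok _
    rw [pv_tokA_eq (tok.length + 1) tok (by omega)]
    rfl
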